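-- pv_equiv track=rewrite | github.com/jeremyary/issue-review | indexer/content.py | _extract_pyproject_deps
-- ===== SOURCE A (Python) =====
-- def _extract_pyproject_deps(content: str) -> str:
--     """Extract dependency-related sections from pyproject.toml."""
--     lines = content.split('\n')
--     result_lines = []
--     in_relevant_section = False
--     relevant_sections = [
--         '[project]',
--         '[project.dependencies]',
--         '[project.optional-dependencies',
--         '[tool.poetry.dependencies]',
--         '[tool.poetry.dev-dependencies]',
--         '[tool.poetry.group',
--     ]
--
--     for line in lines:
--         line_stripped = line.strip()
--
--         # Check if entering a relevant section
--         if line_stripped.startswith('['):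
--             in_relevant_section = any(
--                 line_stripped.startswith(sect) or line_stripped == sect.rstrip(']') + ']'
--                 for sect in relevant_sections
--             )
--
--         if in_relevant_section:
--             result_lines.append(line)
--
--     return '\n'.join(result_lines)
-- ===== SOURCE B (Python) =====
-- def _extract_pyproject_deps(content: str) -> str:
--     """Extract dependency-related sections from pyproject.toml."""
--     relevant_sections = [
--         '[project]',
--         '[project.dependencies]',
--         '[project.optional-dependencies',
--         '[tool.poetry.dependencies]',
--         '[tool.poetry.dev-dependencies]',
--         '[tool.poetry.group',
--     ]
--     # Split into blocks: a headerless preamble, then one block per '[' header line.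
--     blocks = []
--     current = []
--     for line in content.split('\n'):
--         if line.strip().startswith('['):
--             blocks.append(current)
--             current = [line]
--         else:
--             current.append(line)
--     blocks.append(current)
--
--     def relevant(block):
--         if not block:
--             return False
--         head = block[0].strip()
--         return head.startswith('[') and any(head.startswith(s) for s in relevant_sections)
--
--     out = []
--     for block in blocks:
--         if relevant(block):
--             out.extend(block)
--     return '\n'.join(out)
-- ===== Notes on version B (the rewrite author's own statement) =====
-- stated objective: alternative
-- what changed: A's single stateful pass with an in_relevant_section flag is replaced by a split-into-section-blocks / filter-blocks-by-relevant-header / concatenate decomposition; the redundant exact-equality fallback in A's section test, which is absorbed by the prefix test, is dropped.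
import Mathlib
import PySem

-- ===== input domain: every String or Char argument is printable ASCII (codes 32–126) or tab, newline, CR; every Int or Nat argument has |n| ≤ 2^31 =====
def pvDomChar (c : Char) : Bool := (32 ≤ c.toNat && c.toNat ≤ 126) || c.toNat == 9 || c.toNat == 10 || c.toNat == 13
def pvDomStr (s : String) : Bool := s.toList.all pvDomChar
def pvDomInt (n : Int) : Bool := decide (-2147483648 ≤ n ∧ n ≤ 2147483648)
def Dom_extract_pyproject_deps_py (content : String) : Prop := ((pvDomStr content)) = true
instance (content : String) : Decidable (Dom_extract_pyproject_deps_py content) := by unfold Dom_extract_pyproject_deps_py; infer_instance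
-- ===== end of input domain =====

-- B replaces A's stateful flag loop by a split-into-section-blocks / filter-relevant-blocks / concatenate decomposition (objective: alternative, same cost).
-- Both ports work on code-point lists (PySem.Chars, exact for Python str on this domain).

-- ===== PORT A =====
def pvSects : List (List Char) :=
  ["[project]".toList, "[project.dependencies]".toList, "[project.optional-dependencies".toList,
   "[tool.poetry.dependencies]".toList, "[tool.poetry.dev-dependencies]".toList,
   "[tool.poetry.group".toList]

-- 'line_stripped.startswith(sect) or line_stripped == sect.rstrip(']') + ']''.
-- sect.rstrip(']') is rendered with Chars.stripChars (strips both ends): exact here because no sect begins with ']'.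
def pvRelA (st : List Char) : Bool :=
  pvSects.any (fun sect =>
    PySem.Chars.startswith st sect ||
      (st == PySem.Chars.stripChars sect [']'] ++ [']']))

def pvLoopA : List (List Char) → Bool → List (List Char) → List (List Char)
  | [], _, acc => acc
  | l :: ls, flag, acc =>
    let st := PySem.Chars.strip l
    let flag' := if PySem.Chars.startswith st ['['] then pvRelA st else flag
    pvLoopA ls flag' (if flag' then acc ++ [l] else acc)

def extract_pyproject_deps_py (content : String) : String :=
  String.ofList (PySem.Chars.join ['\n']
    (pvLoopA (PySem.Chars.splitOn content.toList ['\n']) false []))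

-- ===== PORT B =====
def pvRelB (st : List Char) : Bool := pvSects.any (fun sect => PySem.Chars.startswith st sect)

-- split the lines into blocks: a headerless preamble, then one block per '['-header line
def pvLoopB : List (List Char) → List (List (List Char)) → List (List Char) → List (List (List Char))
  | [], blocks, cur => blocks ++ [cur]
  | l :: ls, blocks, cur =>
    if PySem.Chars.startswith (PySem.Chars.strip l) ['['] then
      pvLoopB ls (blocks ++ [cur]) [l]
    else
      pvLoopB ls blocks (cur ++ [l])

def pvKeep : List (List Char) → Bool
  | [] => false
  | h :: _ =>
    PySem.Chars.startswith (PySem.Chars.strip h) ['['] && pvRelB (PySem.Chars.strip h)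

def extract_pyproject_deps_py_alt (content : String) : String :=
  String.ofList (PySem.Chars.join ['\n']
    (((pvLoopB (PySem.Chars.splitOn content.toList ['\n']) [] []).filter pvKeep).flatten))

-- ===== PRECONDITION & SPEC =====
def Spec_extract_pyproject_deps_py (content : String) (out : String) : Prop := out = extract_pyproject_deps_py_alt content
instance (content : String) (out : String) : Decidable (Spec_extract_pyproject_deps_py content out) := by unfold Spec_extract_pyproject_deps_py; infer_instance

-- ===== CLAIM (what is proved, stated in full; the proofs are below) =====
def Claim_equal_extract_pyproject_deps_py : Prop := ∀ (content : String), Dom_extract_pyproject_deps_py content → Spec_extract_pyproject_deps_py content (extract_pyproject_deps_py content)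

-- ===== LEMMAS AND PROOFS =====

-- A's extra equality test 'line_stripped == sect.rstrip(']') + ']'' is absorbed by the startswith test
theorem pv_pair (st p q : List Char)
    (hq : PySem.Chars.startswith q p = true) :
    (PySem.Chars.startswith st p || (st == q)) = PySem.Chars.startswith st p := by
  cases hb : (st == q) with
  | false => simp
  | true =>
    have h : st = q := by simpa using hb
    simp [h, hq]

theorem pv_relA_eq_relB (st : List Char) : pvRelA st = pvRelB st := by
  simp only [pvRelA, pvRelB, pvSects, List.any_cons, List.any_nil]
  rw [pv_pair st _ _ (by decide), pv_pair st _ _ (by decide), pv_pair st _ _ (by decide),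
      pv_pair st _ _ (by decide), pv_pair st _ _ (by decide), pv_pair st _ _ (by decide)]

theorem pvLoopA_acc (ls : List (List Char)) (flag : Bool) (acc : List (List Char)) :
    pvLoopA ls flag acc = acc ++ pvLoopA ls flag [] := by
  induction ls generalizing flag acc with
  | nil => simp [pvLoopA]
  | cons l ls ih =>
    simp only [pvLoopA]
    cases h : (if PySem.Chars.startswith (PySem.Chars.strip l) ['['] = true
               then pvRelA (PySem.Chars.strip l) else flag) with
    | false => simp only [Bool.false_eq_true, if_false]; rw [ih]
    | true =>
      simp only [if_true, List.nil_append]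
      rw [ih true (acc ++ [l]), ih true [l], List.append_assoc]

theorem pvLoopB_acc (ls : List (List Char)) (blocks : List (List (List Char))) (cur : List (List Char)) :
    pvLoopB ls blocks cur = blocks ++ pvLoopB ls [] cur := by
  induction ls generalizing blocks cur with
  | nil => simp [pvLoopB]
  | cons l ls ih =>
    simp only [pvLoopB]
    split
    · rw [List.nil_append, ih (blocks ++ [cur]) [l], ih [cur] [l], List.append_assoc]
    · rw [ih]

theorem pv_keep_append (cur : List (List Char)) (l : List Char)
    (h : PySem.Chars.startswith (PySem.Chars.strip l) ['['] = false) :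
    pvKeep (cur ++ [l]) = pvKeep cur := by
  cases cur with
  | nil => simp [pvKeep, h]
  | cons a t => simp [pvKeep]

theorem pv_main (ls : List (List Char)) (cur : List (List Char)) (flag : Bool)
    (hf : flag = pvKeep cur) :
    (if pvKeep cur then cur else []) ++ pvLoopA ls flag [] =
      ((pvLoopB ls [] cur).filter pvKeep).flatten := by
  induction ls generalizing cur flag with
  | nil =>
    simp only [pvLoopA, pvLoopB, List.nil_append, List.filter]
    cases hk : pvKeep cur
    · simp
    · simp
  | cons l ls ih =>
    by_cases hh : PySem.Chars.startswith (PySem.Chars.strip l) ['['] = true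
    · have hkl : pvKeep [l] = pvRelA (PySem.Chars.strip l) := by
        simp [pvKeep, hh, pv_relA_eq_relB]
      simp only [pvLoopA, pvLoopB, hh, if_true]
      rw [pvLoopA_acc, pvLoopB_acc]
      simp only [List.nil_append]
      rw [List.filter_append, List.flatten_append]
      have hcur : (List.filter pvKeep [cur]).flatten = (if pvKeep cur then cur else []) := by
        cases hk : pvKeep cur <;> simp [List.filter, hk]
      have hB := ih [l] (pvRelA (PySem.Chars.strip l)) hkl.symm
      rw [hkl] at hB
      rw [hcur, ← hB]
    · have hh' : PySem.Chars.startswith (PySem.Chars.strip l) ['['] = false := by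
        simpa using hh
      simp only [pvLoopA, pvLoopB, hh', Bool.false_eq_true, if_false]
      rw [pvLoopA_acc]
      have := ih (cur ++ [l]) flag (by rw [pv_keep_append cur l hh']; exact hf)
      rw [pv_keep_append cur l hh'] at this
      rw [← this, hf]
      cases hk : pvKeep cur
      · simp
      · simp

-- ===== VERDICT (by name: the statement is the Claim_ definition above) =====
theorem extract_pyproject_deps_py_spec : Claim_equal_extract_pyproject_deps_py := by
  intro content _
  unfold Spec_extract_pyproject_deps_py extract_pyproject_deps_py extract_pyproject_deps_py_alt
  congr 2
  have := pv_main (PySem.Chars.splitOn content.toList ['\n']) [] false (by simp [pvKeep])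
  simpa using this
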